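-- pv_equiv track=rewrite | github.com/zqwerty/ToDDAPT | convlab2/ptm/eval_tasks/bio_span/predict_bio.py | same_state
-- ===== SOURCE A (Python) =====
-- def same_dict(dict_1, dict_2):
--     # input: dict of {k: v}
--     for key in dict_1:
--         if key not in dict_2:
--             return False
--         # if dict_1[key] != dict_2[key]:
--         elif dict_1[key] == dict_2[key]:
--             continue
--         else:
--             return False
--
--     for key in dict_2:
--         if key not in dict_1:
--             return False
--         elif dict_1[key] == dict_2[key]:
--             continue
--         else:
--             return False
--     return True
--
-- def same_state(pred_bs, target_bs):
--     same = True
--     for _service_name in target_bs: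
--         if len(target_bs[_service_name]) == 0:
--             continue
--         else:
--             if _service_name not in pred_bs:
--                 same = False
--                 break
--             else:
--                 if not same_dict(target_bs[_service_name], pred_bs[_service_name]):
--                     same = False
--                     break
--     if same:
--         for _service_name in pred_bs:
--             if len(pred_bs[_service_name]) == 0:
--                 continue
--             else:
--                 if _service_name not in target_bs:
--                     same = False
--                     break
--                 else:
--                     if not same_dict(target_bs[_service_name], pred_bs[_service_name]):
--                         same = False
--                         break
--     return same
-- ===== SOURCE B (Python) =====
-- def same_state(pred_bs, target_bs):
--     pred_ne = {k: v for k, v in pred_bs.items() if len(v) != 0}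
--     target_ne = {k: v for k, v in target_bs.items() if len(v) != 0}
--     return pred_ne == target_ne
-- ===== Notes on version B (the rewrite author's own statement) =====
-- stated objective: simpler
-- what changed: B replaces the two manual break/continue scanning loops plus the bidirectional same_dict helper by building two dicts filtered to non-empty sub-dicts and returning their built-in dict equality.
import Mathlib
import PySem

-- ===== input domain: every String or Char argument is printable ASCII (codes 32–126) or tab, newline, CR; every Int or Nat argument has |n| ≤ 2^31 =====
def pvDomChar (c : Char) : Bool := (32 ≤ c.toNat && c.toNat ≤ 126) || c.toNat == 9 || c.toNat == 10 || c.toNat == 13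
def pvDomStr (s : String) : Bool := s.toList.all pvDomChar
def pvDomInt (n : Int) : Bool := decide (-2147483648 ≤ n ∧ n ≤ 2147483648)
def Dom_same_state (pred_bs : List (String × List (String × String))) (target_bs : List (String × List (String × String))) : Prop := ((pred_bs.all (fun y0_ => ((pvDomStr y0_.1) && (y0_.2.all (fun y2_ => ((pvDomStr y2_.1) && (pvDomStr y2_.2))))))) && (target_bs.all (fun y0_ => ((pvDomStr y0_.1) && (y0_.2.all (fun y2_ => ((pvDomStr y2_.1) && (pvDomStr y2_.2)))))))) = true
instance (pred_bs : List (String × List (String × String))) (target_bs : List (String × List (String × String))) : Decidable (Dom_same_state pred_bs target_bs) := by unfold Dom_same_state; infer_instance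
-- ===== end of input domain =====

-- B replaces A's two break/continue scanning loops and the bidirectional same_dict helper by
-- filtering both dicts to their non-empty sub-dicts and comparing those with Python's dict equality (objective: simpler).

-- ===== PORT A =====
-- d[k]; in A every such lookup is on a key known to be present, so the default is never the result
def lookD (d : List (String × List (String × String))) (k : String) : List (String × String) :=
  (PySem.Dict.mk d).getD k []

-- first loop of same_dict: for key in dict_1
def same_dict_fwd (d1 d2 : List (String × String)) : List (String × String) → Bool
  | [] => true
  | (k, _) :: rest =>
    if ((PySem.Dict.mk d2).contains k) = false then false
    else if (PySem.Dict.mk d1).get? k == (PySem.Dict.mk d2).get? k then same_dict_fwd d1 d2 rest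
    else false

-- second loop of same_dict: for key in dict_2
def same_dict_bwd (d1 d2 : List (String × String)) : List (String × String) → Bool
  | [] => true
  | (k, _) :: rest =>
    if ((PySem.Dict.mk d1).contains k) = false then false
    else if (PySem.Dict.mk d1).get? k == (PySem.Dict.mk d2).get? k then same_dict_bwd d1 d2 rest
    else false

def same_dict (d1 d2 : List (String × String)) : Bool :=
  if same_dict_fwd d1 d2 d1 then same_dict_bwd d1 d2 d2 else false

-- first loop of same_state: for _service_name in target_bs
def state_loop_t (pred target : List (String × List (String × String))) :
    List (String × List (String × String)) → Bool
  | [] => true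
  | (k, _) :: rest =>
    if PySem.List.len (lookD target k) == 0 then state_loop_t pred target rest
    else if ((PySem.Dict.mk pred).contains k) = false then false
    else if same_dict (lookD target k) (lookD pred k) = false then false
    else state_loop_t pred target rest

-- second loop of same_state: for _service_name in pred_bs
def state_loop_p (pred target : List (String × List (String × String))) :
    List (String × List (String × String)) → Bool
  | [] => true
  | (k, _) :: rest =>
    if PySem.List.len (lookD pred k) == 0 then state_loop_p pred target rest
    else if ((PySem.Dict.mk target).contains k) = false then false
    else if same_dict (lookD target k) (lookD pred k) = false then false
    else state_loop_p pred target rest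

def same_state (pred_bs : List (String × List (String × String))) (target_bs : List (String × List (String × String))) : Bool :=
  let same := state_loop_t pred_bs target_bs target_bs
  if same then state_loop_p pred_bs target_bs pred_bs else same

-- ===== PORT B =====
-- Python '==' on the inner dicts (order-insensitive: same keys, and '=='-equal looked-up values)
def innerEq (v1 v2 : List (String × String)) : Bool :=
  v1.all (fun p => (PySem.Dict.mk v2).get? p.1 == (PySem.Dict.mk v1).get? p.1) &&
  v2.all (fun p => (PySem.Dict.mk v1).get? p.1 == (PySem.Dict.mk v2).get? p.1)

-- Python '==' on the outer dicts: every key of d1 is in d2 with '=='-equal value, and every key of d2 is in d1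
def dictEq (d1 d2 : List (String × List (String × String))) : Bool :=
  d1.all (fun p =>
      match (PySem.Dict.mk d2).get? p.1 with
      | none => false
      | some v2 => innerEq p.2 v2) &&
  d2.all (fun p => (PySem.Dict.mk d1).contains p.1)

def same_state_alt (pred_bs : List (String × List (String × String))) (target_bs : List (String × List (String × String))) : Bool :=
  let pred_ne := pred_bs.filter (fun p => decide (p.2.length ≠ 0))
  let target_ne := target_bs.filter (fun p => decide (p.2.length ≠ 0))
  dictEq pred_ne target_ne

-- ===== PRECONDITION & SPEC =====
-- Pre_ excludes association lists with duplicate outer (service-name) keys: such lists do not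
-- represent any Python dict — A's arguments are dicts, whose keys are necessarily distinct.
def Pre_same_state (pred_bs : List (String × List (String × String))) (target_bs : List (String × List (String × String))) : Prop :=
  (pred_bs.map Prod.fst).Nodup ∧ (target_bs.map Prod.fst).Nodup
instance (pred_bs : List (String × List (String × String))) (target_bs : List (String × List (String × String))) : Decidable (Pre_same_state pred_bs target_bs) := by unfold Pre_same_state; infer_instance

def pvWitness_same_state : (List (String × List (String × String))) × (List (String × List (String × String))) :=
  ([("hotel", [("area", "west")]), ("taxi", [])], [("hotel", [("area", "west")])])

def Spec_same_state (pred_bs : List (String × List (String × String))) (target_bs : List (String × List (String × String))) (out : Bool) : Prop := out = same_state_alt pred_bs target_bs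
instance (pred_bs : List (String × List (String × String))) (target_bs : List (String × List (String × String))) (out : Bool) : Decidable (Spec_same_state pred_bs target_bs out) := by unfold Spec_same_state; infer_instance

-- ===== CLAIM (what is proved, stated in full; the proofs are below) =====
def Claim_equal_same_state : Prop := ∀ (pred_bs : List (String × List (String × String))) (target_bs : List (String × List (String × String))), Dom_same_state pred_bs target_bs → Pre_same_state pred_bs target_bs → Spec_same_state pred_bs target_bs (same_state pred_bs target_bs)

-- ===== LEMMAS AND PROOFS =====

theorem get?_isSome_of_mem {ν : Type} (l : List (String × ν)) : ∀ p ∈ l, ((PySem.Dict.mk l).get? p.1).isSome := by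
  induction l with
  | nil => simp
  | cons q rest ih =>
    intro p hp
    rw [show PySem.Dict.mk (q :: rest) = PySem.Dict.mk ((q.1, q.2) :: rest) by rfl, PySem.Dict.get?_mk_cons]
    rw [List.mem_cons] at hp
    rcases hp with hp | hp
    · subst hp; simp
    · by_cases hq : (q.1 == p.1) = true
      · simp [hq]
      · simpa [hq] using ih p hp

theorem get?_of_mem_nodup {ν : Type} (l : List (String × ν)) (p : String × ν)
    (hnd : (l.map Prod.fst).Nodup) (hp : p ∈ l) : (PySem.Dict.mk l).get? p.1 = some p.2 := by
  exact PySem.Dict.get?_of_mem_items (d := PySem.Dict.mk l) (k := p.1) (v := p.2) (by simpa) (by simpa [PySem.Dict.keys])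

-- "the two dicts are == ": every key of either side looks up to the same value on both sides
def DE (a b : List (String × String)) : Prop :=
  (∀ p ∈ a, (PySem.Dict.mk b).get? p.1 = (PySem.Dict.mk a).get? p.1) ∧
  (∀ p ∈ b, (PySem.Dict.mk a).get? p.1 = (PySem.Dict.mk b).get? p.1)

theorem fwd_char (d1 d2 l) : same_dict_fwd d1 d2 l = true ↔
    ∀ p ∈ l, (PySem.Dict.mk d2).contains p.1 = true ∧ (PySem.Dict.mk d1).get? p.1 = (PySem.Dict.mk d2).get? p.1 := by
  induction l with
  | nil => simp [same_dict_fwd]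
  | cons q rest ih =>
    obtain ⟨k, v⟩ := q
    simp only [same_dict_fwd, List.mem_cons]
    split_ifs with h1 h2
    · constructor
      · intro h; exact absurd h (by simp)
      · intro hr
        have hc := (hr (k, v) (Or.inl rfl)).1
        rw [h1] at hc; exact absurd hc (by simp)
    · rw [ih]
      constructor
      · rintro hr p (rfl | hp)
        · exact ⟨by simpa using h1, by simpa using h2⟩
        · exact hr p hp
      · intro hr p hp; exact hr p (Or.inr hp)
    · constructor
      · intro h; exact absurd h (by simp)
      · intro hr; exact absurd (hr (k, v) (Or.inl rfl)).2 (by simpa using h2)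

theorem bwd_char (d1 d2 l) : same_dict_bwd d1 d2 l = true ↔
    ∀ p ∈ l, (PySem.Dict.mk d1).contains p.1 = true ∧ (PySem.Dict.mk d1).get? p.1 = (PySem.Dict.mk d2).get? p.1 := by
  induction l with
  | nil => simp [same_dict_bwd]
  | cons q rest ih =>
    obtain ⟨k, v⟩ := q
    simp only [same_dict_bwd, List.mem_cons]
    split_ifs with h1 h2
    · constructor
      · intro h; exact absurd h (by simp)
      · intro hr
        have hc := (hr (k, v) (Or.inl rfl)).1
        rw [h1] at hc; exact absurd hc (by simp)
    · rw [ih]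
      constructor
      · rintro hr p (rfl | hp)
        · exact ⟨by simpa using h1, by simpa using h2⟩
        · exact hr p hp
      · intro hr p hp; exact hr p (Or.inr hp)
    · constructor
      · intro h; exact absurd h (by simp)
      · intro hr; exact absurd (hr (k, v) (Or.inl rfl)).2 (by simpa using h2)

theorem same_dict_char (d1 d2) : same_dict d1 d2 = true ↔ DE d1 d2 := by
  unfold same_dict DE
  split_ifs with h1
  · rw [bwd_char]
    rw [fwd_char] at h1
    constructor
    · intro h2
      exact ⟨fun p hp => ((h1 p hp).2).symm, fun p hp => (h2 p hp).2⟩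
    · rintro ⟨ha, hb⟩ p hp
      have he := hb p hp
      refine ⟨?_, he⟩
      rw [PySem.Dict.contains_eq_isSome_get?, he]
      exact get?_isSome_of_mem d2 p hp
  · constructor
    · intro h; exact absurd h (by simp)
    · rintro ⟨ha, hb⟩
      refine absurd ((fwd_char d1 d2 d1).mpr (fun p hp => ⟨?_, (ha p hp).symm⟩)) h1
      rw [PySem.Dict.contains_eq_isSome_get?, ha p hp]
      exact get?_isSome_of_mem d1 p hp

theorem DE_symm {a b} (h : DE a b) : DE b a := ⟨h.2, h.1⟩

theorem DE_ne_nil {a b} (h : DE a b) (ha : a ≠ []) : b ≠ [] := by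
  obtain ⟨p, hp⟩ := List.exists_mem_of_ne_nil a ha
  intro hb; subst hb
  have := h.1 p hp
  rw [show (PySem.Dict.mk ([] : List (String × String))).get? p.1 = none from rfl] at this
  have hs := get?_isSome_of_mem a p hp
  rw [← this] at hs; simp at hs

theorem innerEq_char (a b) : innerEq a b = true ↔ DE a b := by
  unfold innerEq DE
  simp [List.all_eq_true]

-- lookup in a value-filtered dict, under unique keys

-- lookup in a value-filtered dict, under unique keys
theorem get?_filter (l : List (String × List (String × String))) (g : List (String × String) → Bool)
    (hnd : (l.map Prod.fst).Nodup) (k : String) :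
    (PySem.Dict.mk (l.filter (fun p => g p.2))).get? k =
      match (PySem.Dict.mk l).get? k with
      | none => none
      | some v => if g v then some v else none := by
  induction l with
  | nil => rfl
  | cons q rest ih =>
    obtain ⟨kq, vq⟩ := q
    simp only [List.map_cons, List.nodup_cons] at hnd
    by_cases hk : (kq == k) = true
    · have hk' : kq = k := by simpa using hk
      subst hk'
      by_cases hg : g vq = true
      · simp only [List.filter_cons, hg, if_pos]
        rw [show (PySem.Dict.mk ((kq, vq) :: rest)).get? kq = some vq from by rw [PySem.Dict.get?_mk_cons]; simp,
            show (PySem.Dict.mk ((kq, vq) :: rest.filter (fun p => g p.2))).get? kq = some vq from by rw [PySem.Dict.get?_mk_cons]; simp]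
        rw [show (match some vq with | none => (none : Option (List (String × String))) | some v => if g v then some v else none) = if g vq then some vq else none from rfl, if_pos hg]
      · have hfc : ((kq, vq) :: rest).filter (fun p => g p.2) = rest.filter (fun p => g p.2) := by
          simp [List.filter_cons, hg]
        rw [hfc,
            show (PySem.Dict.mk ((kq, vq) :: rest)).get? kq = some vq from by rw [PySem.Dict.get?_mk_cons]; simp,
            show (match some vq with | none => (none : Option (List (String × String))) | some v => if g v then some v else none) = if g vq then some vq else none from rfl,
            if_neg (by simp [hg])]
        rw [PySem.Dict.get?_eq_none_iff_not_mem_keys]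
        intro hmem
        apply hnd.1
        have : kq ∈ (rest.filter (fun p => g p.2)).map Prod.fst := by simpa [PySem.Dict.keys] using hmem
        obtain ⟨p, hp, hpk⟩ := List.mem_map.mp this
        exact List.mem_map.mpr ⟨p, List.mem_of_mem_filter hp, hpk⟩
    · simp only [List.filter_cons]
      have step : ∀ (L : List (String × List (String × String))), (PySem.Dict.mk ((kq, vq) :: L)).get? k = (PySem.Dict.mk L).get? k := by
        intro L; rw [PySem.Dict.get?_mk_cons]; simp [hk]
      rw [show (PySem.Dict.mk ((kq,vq) :: rest)).get? k = (PySem.Dict.mk rest).get? k from step rest]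
      by_cases hg : g vq = true
      · simp only [hg, if_pos]
        rw [step (rest.filter (fun p => g p.2))]
        exact ih hnd.2
      · simp only [hg, Bool.false_eq_true, if_neg, not_false_iff]
        exact ih hnd.2

theorem loop_t_char (pred target l) : state_loop_t pred target l = true ↔
    ∀ p ∈ l, lookD target p.1 ≠ [] →
      (PySem.Dict.mk pred).contains p.1 = true ∧ same_dict (lookD target p.1) (lookD pred p.1) = true := by
  induction l with
  | nil => simp [state_loop_t]
  | cons q rest ih =>
    obtain ⟨k, v⟩ := q
    simp only [state_loop_t, List.mem_cons]
    have hlen : (PySem.List.len (lookD target k) == 0) = true ↔ lookD target k = [] := by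
      simp [PySem.List.len_eq]
    split_ifs with h0 h1 h2
    · rw [ih]
      constructor
      · rintro hr p (rfl | hp)
        · intro hne; exact absurd (hlen.mp h0) hne
        · exact hr p hp
      · intro hr p hp; exact hr p (Or.inr hp)
    · constructor
      · intro h; exact absurd h (by simp)
      · intro hr
        have := (hr (k, v) (Or.inl rfl) (fun he => by rw [hlen.mpr he] at h0; simp at h0)).1
        rw [h1] at this; exact absurd this (by simp)
    · constructor
      · intro h; exact absurd h (by simp)
      · intro hr
        have := (hr (k, v) (Or.inl rfl) (fun he => by rw [hlen.mpr he] at h0; simp at h0)).2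
        rw [h2] at this; exact absurd this (by simp)
    · rw [ih]
      constructor
      · rintro hr p (rfl | hp)
        · intro _
          exact ⟨by simpa using h1, by simpa using h2⟩
        · exact hr p hp
      · intro hr p hp; exact hr p (Or.inr hp)

theorem loop_p_char (pred target l) : state_loop_p pred target l = true ↔
    ∀ p ∈ l, lookD pred p.1 ≠ [] →
      (PySem.Dict.mk target).contains p.1 = true ∧ same_dict (lookD target p.1) (lookD pred p.1) = true := by
  induction l with
  | nil => simp [state_loop_p]
  | cons q rest ih =>
    obtain ⟨k, v⟩ := q
    simp only [state_loop_p, List.mem_cons]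
    have hlen : (PySem.List.len (lookD pred k) == 0) = true ↔ lookD pred k = [] := by
      simp [PySem.List.len_eq]
    split_ifs with h0 h1 h2
    · rw [ih]
      constructor
      · rintro hr p (rfl | hp)
        · intro hne; exact absurd (hlen.mp h0) hne
        · exact hr p hp
      · intro hr p hp; exact hr p (Or.inr hp)
    · constructor
      · intro h; exact absurd h (by simp)
      · intro hr
        have := (hr (k, v) (Or.inl rfl) (fun he => by rw [hlen.mpr he] at h0; simp at h0)).1
        rw [h1] at this; exact absurd this (by simp)
    · constructor
      · intro h; exact absurd h (by simp)
      · intro hr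
        have := (hr (k, v) (Or.inl rfl) (fun he => by rw [hlen.mpr he] at h0; simp at h0)).2
        rw [h2] at this; exact absurd this (by simp)
    · rw [ih]
      constructor
      · rintro hr p (rfl | hp)
        · intro _
          exact ⟨by simpa using h1, by simpa using h2⟩
        · exact hr p hp
      · intro hr p hp; exact hr p (Or.inr hp)

theorem dictEq_char (d1 d2) : dictEq d1 d2 = true ↔
    (∀ p ∈ d1, ∃ v2, (PySem.Dict.mk d2).get? p.1 = some v2 ∧ DE p.2 v2) ∧
    (∀ p ∈ d2, (PySem.Dict.mk d1).contains p.1 = true) := by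
  unfold dictEq
  rw [Bool.and_eq_true, List.all_eq_true, List.all_eq_true]
  constructor
  · rintro ⟨ha, hb⟩
    refine ⟨fun p hp => ?_, fun p hp => hb p hp⟩
    have := ha p hp
    cases hg : (PySem.Dict.mk d2).get? p.1 with
    | none => rw [hg] at this; simp at this
    | some v2 =>
      rw [hg] at this
      exact ⟨v2, rfl, (innerEq_char p.2 v2).mp this⟩
  · rintro ⟨ha, hb⟩
    refine ⟨fun p hp => ?_, fun p hp => hb p hp⟩
    obtain ⟨v2, hg, hde⟩ := ha p hp
    rw [hg]
    exact (innerEq_char p.2 v2).mpr hde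

theorem master (pred target : List (String × List (String × String)))
    (hpnd : (pred.map Prod.fst).Nodup) (htnd : (target.map Prod.fst).Nodup) :
    same_state pred target = same_state_alt pred target := by
  have hlookP : ∀ q ∈ pred, lookD pred q.1 = q.2 := fun q hq => by
    unfold lookD; rw [PySem.Dict.getD_eq_get?_getD, get?_of_mem_nodup pred q hpnd hq]; rfl
  have hlookT : ∀ q ∈ target, lookD target q.1 = q.2 := fun q hq => by
    unfold lookD; rw [PySem.Dict.getD_eq_get?_getD, get?_of_mem_nodup target q htnd hq]; rfl
  have hlook_some : ∀ (d : List (String × List (String × String))) k v,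
      (PySem.Dict.mk d).get? k = some v → lookD d k = v := fun d k v h => by
    unfold lookD; rw [PySem.Dict.getD_eq_get?_getD, h]; rfl
  have hunpack : ∀ (d : List (String × List (String × String))) (k : String) (v2 : List (String × String)),
      (match (PySem.Dict.mk d).get? k with
       | none => none
       | some v => if (fun (w : List (String × String)) => decide (w.length ≠ 0)) v then some v else none) = some v2 →
      (PySem.Dict.mk d).get? k = some v2 ∧ v2 ≠ [] := by
    intro d k v2 h
    cases hg : (PySem.Dict.mk d).get? k with
    | none => rw [hg] at h; simp at h
    | some w =>
      rw [hg] at h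
      by_cases hw : w.length ≠ 0
      · have h2 : w = v2 := by simpa [hw] using h
        subst h2
        exact ⟨rfl, by intro he; subst he; simp at hw⟩
      · exfalso; simpa [hw] using h
  have hTf := get?_filter target (fun w => decide (w.length ≠ 0)) htnd
  have hPf := get?_filter pred (fun w => decide (w.length ≠ 0)) hpnd
  have hA : same_state pred target = true ↔
      (state_loop_t pred target target = true ∧ state_loop_p pred target pred = true) := by
    unfold same_state
    cases htv : state_loop_t pred target target <;> simp [htv]
  rw [Bool.eq_iff_iff, hA, loop_t_char, loop_p_char]
  show _ ↔ same_state_alt pred target = true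
  unfold same_state_alt
  rw [dictEq_char]
  constructor
  · rintro ⟨hAT, hAP⟩
    constructor
    · intro p hp
      obtain ⟨hpm, hpv⟩ := List.mem_filter.mp hp
      have hpne : p.2 ≠ [] := by intro he; rw [he] at hpv; simp at hpv
      have hlp := hlookP p hpm
      obtain ⟨hc, hsd⟩ := hAP p hpm (by rw [hlp]; exact hpne)
      rw [PySem.Dict.contains_eq_isSome_get?] at hc
      obtain ⟨v2, hget⟩ := Option.isSome_iff_exists.mp hc
      have hlt := hlook_some target p.1 v2 hget
      rw [hlt, hlp] at hsd
      have hde : DE v2 p.2 := (same_dict_char _ _).mp hsd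
      have hv2ne : v2 ≠ [] := DE_ne_nil (DE_symm hde) hpne
      refine ⟨v2, ?_, DE_symm hde⟩
      rw [hTf p.1, hget]
      simp [hv2ne]
    · intro p hp
      obtain ⟨hpm, hpv⟩ := List.mem_filter.mp hp
      have hpne : p.2 ≠ [] := by intro he; rw [he] at hpv; simp at hpv
      have hlt := hlookT p hpm
      obtain ⟨hc, hsd⟩ := hAT p hpm (by rw [hlt]; exact hpne)
      rw [PySem.Dict.contains_eq_isSome_get?] at hc
      obtain ⟨v, hget⟩ := Option.isSome_iff_exists.mp hc
      have hlp := hlook_some pred p.1 v hget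
      rw [hlt, hlp] at hsd
      have hde : DE p.2 v := (same_dict_char _ _).mp hsd
      have hvne : v ≠ [] := DE_ne_nil hde hpne
      rw [PySem.Dict.contains_eq_isSome_get?, hPf p.1, hget]
      simp [hvne]
  · rintro ⟨hB1, hB2⟩
    constructor
    · intro p hp hne
      have hlt := hlookT p hp
      rw [hlt] at hne
      have hpmem : p ∈ target.filter (fun q => decide (q.2.length ≠ 0)) :=
        List.mem_filter.mpr ⟨hp, by simpa using (by intro he; exact hne (by simpa using he) : ¬ p.2.length = 0)⟩
      have hc := hB2 p hpmem
      rw [PySem.Dict.contains_eq_isSome_get?, hPf p.1] at hc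
      obtain ⟨v2, hv2⟩ := Option.isSome_iff_exists.mp hc
      obtain ⟨hgp, hvne⟩ := hunpack pred p.1 v2 hv2
      have hpv_mem : (p.1, v2) ∈ pred := by
        simpa using PySem.Dict.mem_items_of_get?_eq_some (d := PySem.Dict.mk pred) hgp
      have hpv_ne : (p.1, v2) ∈ pred.filter (fun q => decide (q.2.length ≠ 0)) :=
        List.mem_filter.mpr ⟨hpv_mem, by simpa using hvne⟩
      obtain ⟨w, hw, hdew⟩ := hB1 (p.1, v2) hpv_ne
      rw [hTf p.1] at hw
      obtain ⟨hgt, hwne⟩ := hunpack target p.1 w hw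
      rw [get?_of_mem_nodup target p htnd hp] at hgt
      obtain rfl := Option.some.inj hgt
      constructor
      · rw [PySem.Dict.contains_eq_isSome_get?, hgp]; rfl
      · rw [hlt, hlook_some pred p.1 v2 hgp]
        exact (same_dict_char _ _).mpr (DE_symm hdew)
    · intro p hp hne
      have hlp := hlookP p hp
      rw [hlp] at hne
      have hpmem : p ∈ pred.filter (fun q => decide (q.2.length ≠ 0)) :=
        List.mem_filter.mpr ⟨hp, by simpa using hne⟩
      obtain ⟨v2, hv2, hde⟩ := hB1 p hpmem
      rw [hTf p.1] at hv2
      obtain ⟨hgt, hvne⟩ := hunpack target p.1 v2 hv2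
      constructor
      · rw [PySem.Dict.contains_eq_isSome_get?, hgt]; rfl
      · rw [hlp, hlook_some target p.1 v2 hgt]
        exact (same_dict_char _ _).mpr (DE_symm hde)

-- ===== VERDICT (by name: the statement is the Claim_ definition above) =====
theorem same_state_spec : Claim_equal_same_state := by
  intro pred_bs target_bs _hdom hpre
  unfold Spec_same_state
  exact master pred_bs target_bs hpre.1 hpre.2
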